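-- pv_equiv track=rewrite | github.com/smenon8/AlgDataStruct_practice | practice_problems/QuestionsPractice.py | isSubstrMeth2
-- ===== SOURCE A (Python) =====
-- def isSubstrMeth2(master,substr):
-- 	charMapMaster ={}
-- 	charMapSub = {}
--
-- 	if len(master) < len(substr):
-- 		return False
-- 	else:
-- 		for i in range(len(master)):
-- 			charMapMaster[master[i]] = charMapMaster.get(master[i],0) + 1
-- 		for i in range(len(substr)):
-- 			charMapSub[substr[i]] = charMapSub.get(substr[i],0) + 1
-- 		for key in charMapSub.keys():
-- 			if key not in charMapMaster or charMapSub[key] > charMapMaster[key]: # makes it O(n^2)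
-- 				return False
-- 		return True
-- ===== SOURCE B (Python) =====
-- def isSubstrMeth2(master, substr):
--     # Sort both strings, then check with one merge-style two-pointer pass that
--     # every char of sorted(substr) can be matched against a distinct position of
--     # sorted(master).  Multiset inclusion == A's per-char count check, and it
--     # forces len(substr) <= len(master), so no length guard is needed.
--     ms = sorted(master)
--     ss = sorted(substr)
--     i = 0
--     n = len(ms)
--     for c in ss:
--         while i < n and ms[i] < c:
--             i += 1
--         if i == n or ms[i] != c:
--             return False
--         i += 1
--     return True
-- ===== Notes on version B (the rewrite author's own statement) =====
-- stated objective: alternative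
-- what changed: B replaces A's two hash-count maps and key-comparison loop with a sort-then-merge algorithm: sort both strings and run one two-pointer pass matching each char of sorted(substr) against a distinct position of sorted(master); no dictionary is built and the length guard disappears.
import Mathlib
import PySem

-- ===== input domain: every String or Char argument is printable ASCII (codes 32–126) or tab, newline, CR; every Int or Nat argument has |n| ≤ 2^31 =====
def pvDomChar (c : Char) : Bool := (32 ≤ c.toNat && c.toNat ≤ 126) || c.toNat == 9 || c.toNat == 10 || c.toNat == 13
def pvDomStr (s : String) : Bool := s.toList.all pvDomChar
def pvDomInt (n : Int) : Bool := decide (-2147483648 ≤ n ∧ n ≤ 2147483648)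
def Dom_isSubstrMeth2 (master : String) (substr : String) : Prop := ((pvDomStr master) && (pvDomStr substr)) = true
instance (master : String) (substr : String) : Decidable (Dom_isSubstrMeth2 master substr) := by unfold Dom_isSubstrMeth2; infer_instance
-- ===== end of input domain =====

-- B replaces A's two count-dicts + key-comparison loop with sort-then-merge: sort both
-- strings and run one two-pointer matching pass, no dictionary (objective: alternative).


-- ===== PORT A =====
-- 'for key in charMapSub.keys(): if key not in charMapMaster or charMapSub[key] > charMapMaster[key]: return False / return True'
def pvAKeyLoop (mM mS : PySem.Dict Char Int) : List Char → Bool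
  | [] => true
  | k :: rest =>
    if !mM.contains k || decide (mS.getD k 0 > mM.getD k 0) then false
    else pvAKeyLoop mM mS rest

def isSubstrMeth2 (master : String) (substr : String) : Bool :=
  if PySem.Str.len master < PySem.Str.len substr then false
  else
    let charMapMaster :=
      master.toList.foldl (fun d c => d.insert c (d.getD c 0 + 1)) PySem.Dict.empty
    let charMapSub :=
      substr.toList.foldl (fun d c => d.insert c (d.getD c 0 + 1)) PySem.Dict.empty
    pvAKeyLoop charMapMaster charMapSub charMapSub.keys

-- ===== PORT B =====
-- the two-pointer pass over the sorted lists: the remaining suffix of ms plays the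
-- role of index i; the 'while ms[i] < c' advance is the first branch
def pvMergeOk : List Char → List Char → Bool
  | _, [] => true
  | [], _ :: _ => false
  | m :: ms, c :: ss =>
    if m < c then pvMergeOk ms (c :: ss)
    else if m = c then pvMergeOk ms ss
    else false

def isSubstrMeth2_alt (master : String) (substr : String) : Bool :=
  pvMergeOk (PySem.List.sorted master.toList (fun c => c) false)
            (PySem.List.sorted substr.toList (fun c => c) false)

-- ===== PRECONDITION & SPEC =====
def Spec_isSubstrMeth2 (master : String) (substr : String) (out : Bool) : Prop := out = isSubstrMeth2_alt master substr
instance (master : String) (substr : String) (out : Bool) : Decidable (Spec_isSubstrMeth2 master substr out) := by unfold Spec_isSubstrMeth2; infer_instance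

-- ===== CLAIM (what is proved, stated in full; the proofs are below) =====
def Claim_equal_isSubstrMeth2 : Prop := ∀ (master : String) (substr : String), Dom_isSubstrMeth2 master substr → Spec_isSubstrMeth2 master substr (isSubstrMeth2 master substr)

-- ===== LEMMAS AND PROOFS =====

-- A's early-exit key loop succeeds iff every key passes its per-key test.
theorem pvAKeyLoop_iff (mM mS : PySem.Dict Char Int) (l : List Char) :
    pvAKeyLoop mM mS l = true ↔
      ∀ k ∈ l, mM.contains k = true ∧ mS.getD k 0 ≤ mM.getD k 0 := by
  induction l with
  | nil => simp [pvAKeyLoop]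
  | cons k rest ih =>
    simp only [pvAKeyLoop, List.mem_cons]
    by_cases h1 : mM.contains k = true
    · by_cases h2 : mS.getD k 0 > mM.getD k 0
      · rw [if_pos (by simp [h1, h2])]
        constructor
        · intro hf; cases hf
        · intro hall
          exact absurd (hall k (Or.inl rfl)).2 (not_le.mpr h2)
      · rw [if_neg (by simp [h1, h2]), ih]
        constructor
        · intro hall x hx
          rcases hx with rfl | hx
          · exact ⟨h1, by omega⟩
          · exact hall x hx
        · intro hall x hx
          exact hall x (Or.inr hx)
    · rw [if_pos (by simp [h1])]
      constructor
      · intro hf; cases hf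
      · intro hall
        exact absurd (hall k (Or.inl rfl)).1 h1

-- The membership test in A's per-key condition is redundant once counts are
-- compared: a char of substr has positive count, so the two conditions agree.
theorem keyCond_iff (ms ss : List Char) :
    (∀ k ∈ PySem.Set.ofList ss,
        (ms.contains k = true) ∧ ((ss.count k : Int) ≤ (ms.count k : Int)))
    ↔ (∀ c ∈ ss, ((ss.count c : Int) ≤ (ms.count c : Int))) := by
  constructor
  · intro h c hc
    exact (h c (by simp [PySem.Set.mem_ofList, hc])).2
  · intro h k hk
    have hk' : k ∈ ss := by simpa [PySem.Set.mem_ofList] using hk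
    refine ⟨?_, h k hk'⟩
    have hpos : 0 < ss.count k := List.count_pos_iff.mpr hk'
    have hle := h k hk'
    have hm : 0 < ms.count k := by push_cast at hle; omega
    simpa using List.count_pos_iff.mp hm

-- On sorted lists B's merge pass succeeds iff ss is multiset-included in ms.
theorem pvMergeOk_iff (ms : List Char) :
    ∀ ss : List Char, ms.Pairwise (· ≤ ·) → ss.Pairwise (· ≤ ·) →
      (pvMergeOk ms ss = true ↔ ∀ c ∈ ss, ss.count c ≤ ms.count c) := by
  induction ms with
  | nil =>
    intro ss _ _
    cases ss with
    | nil => simp [pvMergeOk]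
    | cons c ss' =>
      simp only [pvMergeOk]
      constructor
      · intro hf; cases hf
      · intro hall
        have := hall c List.mem_cons_self
        have : 0 < (c :: ss').count c := List.count_pos_iff.mpr List.mem_cons_self
        simp_all
  | cons m ms' ih =>
    intro ss hms hss
    have hms' : ms'.Pairwise (· ≤ ·) := hms.tail
    have hmle : ∀ y ∈ ms', m ≤ y := fun y hy => (List.pairwise_cons.mp hms).1 y hy
    cases ss with
    | nil => simp [pvMergeOk]
    | cons c ss' =>
      have hss' : ss'.Pairwise (· ≤ ·) := hss.tail
      have hcle : ∀ y ∈ ss', c ≤ y := fun y hy => (List.pairwise_cons.mp hss).1 y hy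
      simp only [pvMergeOk]
      by_cases h1 : m < c
      · rw [if_pos h1, ih (c :: ss') hms' hss]
        have hne : ∀ x ∈ c :: ss', x ≠ m := by
          intro x hx
          rcases List.mem_cons.mp hx with rfl | hx'
          · exact fun he => absurd he.symm (ne_of_lt h1)
          · have hcx : c ≤ x := hcle x hx'
            intro he
            rw [he] at hcx
            exact absurd (lt_of_lt_of_le h1 hcx) (lt_irrefl m)
        constructor
        · intro hall x hx
          rw [List.count_cons_of_ne (fun he => hne x hx he.symm)]
          exact hall x hx
        · intro hall x hx
          have := hall x hx
          rwa [List.count_cons_of_ne (fun he => hne x hx he.symm)] at this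
      · by_cases h2 : m = c
        · subst h2
          rw [if_neg h1, if_pos rfl, ih ss' hms' hss']
          constructor
          · intro hall x hx
            rcases List.mem_cons.mp hx with rfl | hx'
            · rw [List.count_cons_self, List.count_cons_self]
              by_cases hxin : x ∈ ss'
              · exact Nat.add_le_add_right (hall x hxin) 1
              · rw [List.count_eq_zero.mpr hxin]; omega
            · rcases eq_or_ne x m with rfl | hne
              · rw [List.count_cons_self, List.count_cons_self]
                exact Nat.add_le_add_right (hall x hx') 1
              · rw [List.count_cons_of_ne hne.symm, List.count_cons_of_ne hne.symm]
                exact hall x hx'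
          · intro hall x hx
            have := hall x (List.mem_cons_of_mem _ hx)
            rcases eq_or_ne x m with rfl | hne
            · rw [List.count_cons_self, List.count_cons_self] at this; omega
            · rwa [List.count_cons_of_ne hne.symm, List.count_cons_of_ne hne.symm] at this
        · rw [if_neg h1, if_neg h2]
          have hc_lt : c < m := lt_of_le_of_ne (le_of_not_gt h1) (fun he => h2 he.symm)
          constructor
          · intro hf; cases hf
          · intro hall
            have hnotin : c ∉ m :: ms' := by
              intro hc
              rcases List.mem_cons.mp hc with rfl | hc'
              · exact absurd hc_lt (lt_irrefl c)
              · exact absurd (lt_of_lt_of_le hc_lt (hmle c hc')) (lt_irrefl c)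
            have h0 : (m :: ms').count c = 0 := List.count_eq_zero.mpr hnotin
            have := hall c List.mem_cons_self
            rw [h0, List.count_cons_self] at this
            omega

-- B succeeds iff the raw (unsorted) count condition holds.
theorem alt_iff_counts (master substr : String) :
    isSubstrMeth2_alt master substr = true ↔
      ∀ c ∈ substr.toList, substr.toList.count c ≤ master.toList.count c := by
  unfold isSubstrMeth2_alt
  have hpm : (PySem.List.sorted master.toList (fun c => c) false).Perm master.toList :=
    PySem.List.sorted_perm ..
  have hps : (PySem.List.sorted substr.toList (fun c => c) false).Perm substr.toList :=
    PySem.List.sorted_perm ..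
  rw [pvMergeOk_iff _ _ (PySem.List.sorted_pairwise ..) (PySem.List.sorted_pairwise ..)]
  constructor
  · intro h c hc
    have := h c (hps.mem_iff.mpr hc)
    rwa [hps.count_eq, hpm.count_eq] at this
  · intro h c hc
    rw [hps.count_eq, hpm.count_eq]
    exact h c (hps.mem_iff.mp hc)

-- ===== VERDICT (by name: the statement is the Claim_ definition above) =====
theorem isSubstrMeth2_spec : Claim_equal_isSubstrMeth2 := by
  intro master substr _
  unfold Spec_isSubstrMeth2 isSubstrMeth2
  by_cases hlen : PySem.Str.len master < PySem.Str.len substr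
  · rw [if_pos hlen]
    by_contra h
    have hB : isSubstrMeth2_alt master substr = true := by
      cases hb : isSubstrMeth2_alt master substr
      · exact absurd hb.symm h
      · rfl
    have hcnt := (alt_iff_counts master substr).mp hB
    have hsub : List.Subperm substr.toList master.toList :=
      List.subperm_ext_iff.mpr (fun x hx => hcnt x hx)
    have := hsub.length_le
    simp only [PySem.Str.len_eq] at hlen
    omega
  · rw [if_neg hlen]
    rw [Bool.eq_iff_iff, pvAKeyLoop_iff, alt_iff_counts]
    rw [PySem.Dict.foldl_insert_getD_add_one_eq_counter,
        PySem.Dict.foldl_insert_getD_add_one_eq_counter]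
    simp only [PySem.Dict.keys_counter, PySem.Dict.getD_counter,
      PySem.Dict.contains_counter]
    rw [keyCond_iff master.toList substr.toList]
    constructor
    · intro h c hc; exact_mod_cast h c hc
    · intro h c hc; exact_mod_cast h c hc
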